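-- pv_equiv track=rewrite | github.com/chahyon-ku/polygots | tools/line2cols.py | is_clean_tag
-- ===== SOURCE A (Python) =====
-- def is_clean_tag(tag_list):
--     prev_pos, prev_lab = None, None
--     found = False
--     for tag in tag_list:
--         if tag != "O":
--             found = True
--         pos, lab = tag[:2], tag[2:]
--         if pos not in {"B-", "I-", "E-", "S-", "O"}:
--             return False
--
--         if prev_lab is not None:
--             if pos in {"I-", "E-"} and lab != prev_lab:  # type conflict
--                 return False
--         prev_pos, prev_lab = pos, lab
--     if prev_pos not in {"E-", "S-", "O"}:  # not end well
--         return False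
--     if not found:
--         return False
--     return True
-- ===== SOURCE B (Python) =====
-- def is_clean_tag(tag_list):
--     # run-based validation: group the sequence into maximal same-label runs and
--     # only check that each run after the first opens with B-, S- or O
--     if not tag_list or set(tag_list) == {"O"}:
--         return False
--     if tag_list[-1][:2] not in ("E-", "S-", "O"):
--         return False
--     n, i = len(tag_list), 0
--     while i < n:
--         if i and tag_list[i][:2] in ("I-", "E-"):
--             return False
--         lab = tag_list[i][2:]
--         while i < n and tag_list[i][2:] == lab:
--             if tag_list[i][:2] not in ("B-", "I-", "E-", "S-", "O"):
--                 return False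
--             i += 1
--     return True
-- ===== Notes on version B (the rewrite author's own statement) =====
-- stated objective: alternative
-- what changed: Replaced A's element-wise stateful loop (prev_pos/prev_lab/found) by a run-based algorithm: a set() equality test for the all-O case, a direct last-tag end check, and a nested loop that groups the list into maximal same-label runs, checking validity inside a run and the I-/E- conflict only at run openings.
import Mathlib
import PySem

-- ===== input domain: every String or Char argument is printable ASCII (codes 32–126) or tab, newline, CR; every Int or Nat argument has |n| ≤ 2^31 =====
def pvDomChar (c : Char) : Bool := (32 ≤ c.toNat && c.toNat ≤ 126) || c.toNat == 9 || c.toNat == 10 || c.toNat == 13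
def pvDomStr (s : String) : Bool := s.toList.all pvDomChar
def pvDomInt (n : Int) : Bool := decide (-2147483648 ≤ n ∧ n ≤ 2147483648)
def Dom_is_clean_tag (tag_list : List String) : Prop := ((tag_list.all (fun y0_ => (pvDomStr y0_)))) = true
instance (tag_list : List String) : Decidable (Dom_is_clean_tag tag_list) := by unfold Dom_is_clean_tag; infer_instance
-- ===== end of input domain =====

-- B replaces A's element-wise stateful loop (prev_pos/prev_lab/found) by a run-based
-- algorithm: a set() test for the all-"O" case, a direct last-tag end check, and a nested
-- loop over maximal same-label runs, checking the I-/E- conflict only at run openings.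

-- ===== PORT A =====
-- tag[:2] and tag[2:]
def pvPos (t : String) : String := PySem.Str.slice t none (some 2)
def pvLab (t : String) : String := PySem.Str.slice t (some 2) none

-- the loop of A, carrying prev_pos, prev_lab, found; early `return False` = result false
def is_clean_tag_go (prev_pos prev_lab : Option String) (found : Bool) : List String → Bool
  | [] =>
    if ¬ (prev_pos = some "E-" ∨ prev_pos = some "S-" ∨ prev_pos = some "O") then false
    else if found = false then false
    else true
  | tag :: rest =>
    let found := if tag ≠ "O" then true else found
    let pos := pvPos tag
    let lab := pvLab tag
    if ¬ (pos = "B-" ∨ pos = "I-" ∨ pos = "E-" ∨ pos = "S-" ∨ pos = "O") then false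
    else
      match prev_lab with
      | some pl =>
        if (pos = "I-" ∨ pos = "E-") ∧ lab ≠ pl then false
        else is_clean_tag_go (some pos) (some lab) found rest
      | none => is_clean_tag_go (some pos) (some lab) found rest

def is_clean_tag (tag_list : List String) : Bool :=
  is_clean_tag_go none none false tag_list

-- ===== PORT B =====
-- the inner while loop of B: consume the leading tags whose label is `lab`,
-- failing (none) on a tag with an invalid prefix; returns the remaining suffix
def pvEatRun (lab : String) : List String → Option (List String)
  | [] => some []
  | t :: rest =>
    if pvLab t = lab then
      if pvPos t = "B-" ∨ pvPos t = "I-" ∨ pvPos t = "E-" ∨ pvPos t = "S-" ∨ pvPos t = "O"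
      then pvEatRun lab rest
      else none
    else some (t :: rest)

-- termination measure for the outer loop below
lemma pvEatRun_length_le (lab : String) : ∀ (l l' : List String),
    pvEatRun lab l = some l' → l'.length ≤ l.length := by
  intro l
  induction l with
  | nil => intro l' h; simp [pvEatRun] at h; simp [← h]
  | cons t rest ih =>
    intro l' h
    by_cases h1 : pvLab t = lab
    · by_cases h2 : pvPos t = "B-" ∨ pvPos t = "I-" ∨ pvPos t = "E-" ∨ pvPos t = "S-" ∨ pvPos t = "O"
      · simp only [pvEatRun, if_pos h1, if_pos h2] at h
        have := ih l' h
        simp only [List.length_cons]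
        omega
      · simp [pvEatRun, if_pos h1, h2] at h
    · simp only [pvEatRun, if_neg h1] at h
      cases h
      exact le_refl _

lemma pvEatRun_cons_length (t : String) (rest l' : List String)
    (h : pvEatRun (pvLab t) (t :: rest) = some l') : l'.length ≤ rest.length := by
  by_cases h2 : pvPos t = "B-" ∨ pvPos t = "I-" ∨ pvPos t = "E-" ∨ pvPos t = "S-" ∨ pvPos t = "O"
  · simp only [pvEatRun, if_pos h2] at h
    exact pvEatRun_length_le (pvLab t) rest l' h
  · simp [pvEatRun, h2] at h

-- the outer while loop of B, over the remaining suffix; `first` = (i == 0)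
def pvRuns : List String → Bool → Bool
  | [], _ => true
  | t :: rest, first =>
    if first = false ∧ (pvPos t = "I-" ∨ pvPos t = "E-") then false
    else
      match h : pvEatRun (pvLab t) (t :: rest) with
      | none => false
      | some [] => true
      | some (u :: rs) => pvRuns (u :: rs) false
termination_by l _ => l.length
decreasing_by
  have := pvEatRun_cons_length t rest (u :: rs) h
  simp only [List.length_cons] at this ⊢
  omega

def is_clean_tag_alt (tag_list : List String) : Bool :=
  match tag_list with
  | [] => false
  | t :: rest =>
    if PySem.Set.equal (PySem.Set.ofList (t :: rest)) (PySem.Set.ofList ["O"]) then false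
    else if ¬ (pvPos ((t :: rest).getLast (List.cons_ne_nil t rest)) = "E-" ∨
               pvPos ((t :: rest).getLast (List.cons_ne_nil t rest)) = "S-" ∨
               pvPos ((t :: rest).getLast (List.cons_ne_nil t rest)) = "O") then false
    else pvRuns (t :: rest) true

-- ===== PRECONDITION & SPEC =====
def Spec_is_clean_tag (tag_list : List String) (out : Bool) : Prop := out = is_clean_tag_alt tag_list
instance (tag_list : List String) (out : Bool) : Decidable (Spec_is_clean_tag tag_list out) := by unfold Spec_is_clean_tag; infer_instance

-- ===== CLAIM (what is proved, stated in full; the proofs are below) =====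
def Claim_equal_is_clean_tag : Prop := ∀ (tag_list : List String), Dom_is_clean_tag tag_list → Spec_is_clean_tag tag_list (is_clean_tag tag_list)

-- ===== LEMMAS AND PROOFS =====

def pvValid (t : String) : Bool :=
  decide (pvPos t = "B-" ∨ pvPos t = "I-" ∨ pvPos t = "E-" ∨ pvPos t = "S-" ∨ pvPos t = "O")

def pvEnd (p : String) : Bool := decide (p = "E-" ∨ p = "S-" ∨ p = "O")

def pvChain (pl : String) : List String → Bool
  | [] => true
  | t :: rest =>
    if (pvPos t = "I-" ∨ pvPos t = "E-") ∧ pvLab t ≠ pl then false else pvChain (pvLab t) rest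

def pvLastPos (p : String) : List String → String
  | [] => p
  | t :: rest => pvLastPos (pvPos t) rest

lemma pv_go_spec (l : List String) : ∀ (p0 pl0 : String) (found : Bool),
    is_clean_tag_go (some p0) (some pl0) found l =
      (l.all pvValid && pvChain pl0 l && pvEnd (pvLastPos p0 l)
        && (found || l.any (fun t => decide (t ≠ "O")))) := by
  induction l with
  | nil =>
    intro p0 pl0 found
    cases found <;> by_cases hp : p0 = "E-" ∨ p0 = "S-" ∨ p0 = "O" <;>
      simp [is_clean_tag_go, pvLastPos, pvChain, pvEnd, hp]
  | cons t rest ih =>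
    intro p0 pl0 found
    simp only [is_clean_tag_go, pvChain, pvLastPos, List.all_cons, List.any_cons]
    by_cases hv : pvPos t = "B-" ∨ pvPos t = "I-" ∨ pvPos t = "E-" ∨ pvPos t = "S-" ∨ pvPos t = "O"
    · by_cases hc : (pvPos t = "I-" ∨ pvPos t = "E-") ∧ pvLab t ≠ pl0
      · simp [hv, hc, pvValid]
      · have hval : pvValid t = true := by simp [pvValid, hv]
        simp only [hv, hc, if_false]
        rw [ih]
        simp only [hval, Bool.true_and]
        have hor : ((if t ≠ "O" then true else found) || rest.any (fun t => decide (t ≠ "O")))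
            = (found || (decide (t ≠ "O") || rest.any (fun t => decide (t ≠ "O")))) := by
          by_cases ho : t = "O" <;> cases found <;> simp [ho]
        rw [hor]
        simp
    · simp [hv, pvValid]

lemma pv_lastPos_getLastD (rest : List String) : ∀ (t : String),
    pvLastPos (pvPos t) rest = pvPos (rest.getLastD t) := by
  induction rest with
  | nil => intro t; simp [pvLastPos]
  | cons u rs ih => intro t; rw [List.getLastD_cons]; exact ih u

lemma pv_getLast_eq (t : String) (rest : List String) (h : t :: rest ≠ []) :
    (t :: rest).getLast h = rest.getLastD t := by
  induction rest generalizing t with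
  | nil => rfl
  | cons u rs ih =>
    rw [List.getLast_cons (List.cons_ne_nil u rs), ih u (List.cons_ne_nil u rs), List.getLastD_cons]

lemma pv_any_ne_O (l : List String) :
    l.any (fun s => !decide (s = "O")) = !l.all (fun s => decide (s = "O")) := by
  induction l with
  | nil => rfl
  | cons a l ih => simp [List.any_cons, List.all_cons, ih, Bool.not_and]

-- the inner run loop checks exactly validity-plus-chain on the consumed prefix
lemma pvEatRun_spec (lab : String) : ∀ (l : List String),
    (∀ l', pvEatRun lab l = some l' →
      (l.all pvValid && pvChain lab l) = (l'.all pvValid && pvChain lab l')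
        ∧ (∀ u rs, l' = u :: rs → pvLab u ≠ lab))
    ∧ (pvEatRun lab l = none → (l.all pvValid && pvChain lab l) = false) := by
  intro l
  induction l with
  | nil =>
    refine ⟨fun l' h => ?_, by simp [pvEatRun]⟩
    simp [pvEatRun] at h
    subst h
    exact ⟨rfl, by simp⟩
  | cons t rest ih =>
    by_cases h1 : pvLab t = lab
    · have hchain : pvChain lab (t :: rest) = pvChain lab rest := by
        simp [pvChain, h1]
      by_cases h2 : pvPos t = "B-" ∨ pvPos t = "I-" ∨ pvPos t = "E-" ∨ pvPos t = "S-" ∨ pvPos t = "O"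
      · have hstep : pvEatRun lab (t :: rest) = pvEatRun lab rest := by
          simp [pvEatRun, if_pos h1, if_pos h2]
        have hval : pvValid t = true := by simp [pvValid, h2]
        constructor
        · intro l' h
          rw [hstep] at h
          refine ⟨?_, (ih.1 l' h).2⟩
          rw [List.all_cons, hval, Bool.true_and, hchain]
          exact (ih.1 l' h).1
        · intro h
          rw [hstep] at h
          rw [List.all_cons, hval, Bool.true_and, hchain]
          exact ih.2 h
      · have hstep : pvEatRun lab (t :: rest) = none := by
          simp [pvEatRun, if_pos h1, h2]
        have hval : pvValid t = false := by simp [pvValid, h2]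
        exact ⟨fun l' h => absurd (hstep ▸ h) (by simp), fun _ => by simp [hval]⟩
    · have hstep : pvEatRun lab (t :: rest) = some (t :: rest) := by
        simp [pvEatRun, if_neg h1]
      constructor
      · intro l' h
        rw [hstep] at h
        cases h
        exact ⟨rfl, fun u rs h => by cases h; exact h1⟩
      · intro h; rw [hstep] at h; cases h

-- the continuation shared by both branches of the outer loop
lemma pv_runs_core (n : Nat)
    (ih : ∀ (l : List String), l.length ≤ n → ∀ (pl : String) (first : Bool),
      (first = true → ∀ u rs, l = u :: rs → pl = pvLab u) →
      (first = false → ∀ u rs, l = u :: rs → pvLab u ≠ pl) →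
      pvRuns l first = (l.all pvValid && pvChain pl l))
    (t : String) (rest : List String) (hl : (t :: rest).length ≤ n + 1)
    (first : Bool) (hguard : ¬ (first = false ∧ (pvPos t = "I-" ∨ pvPos t = "E-"))) :
    pvRuns (t :: rest) first = ((t :: rest).all pvValid && pvChain (pvLab t) rest) := by
  have hch : pvChain (pvLab t) (t :: rest) = pvChain (pvLab t) rest := by
    simp [pvChain]
  have hspec := pvEatRun_spec (pvLab t) (t :: rest)
  rw [pvRuns, if_neg hguard]
  split
  · next heq =>
      rw [← hch]
      exact (hspec.2 heq).symm
  · next heq =>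
      have heq2 := (hspec.1 [] heq).1
      rw [show (([] : List String).all pvValid && pvChain (pvLab t) []) = true from rfl] at heq2
      rw [← hch]
      exact heq2.symm
  · next u rs heq =>
      have hlen : (u :: rs).length ≤ n := by
        have hle := pvEatRun_cons_length t rest (u :: rs) heq
        simp only [List.length_cons] at hl hle ⊢
        omega
      have hne := (hspec.1 (u :: rs) heq).2 u rs rfl
      rw [ih (u :: rs) hlen (pvLab t) false (by simp)
        (fun _ u' rs' he => by cases he; exact hne)]
      rw [← hch]
      exact ((hspec.1 (u :: rs) heq).1).symm

-- the outer run loop equals "all tags valid AND the chain from pl holds",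
-- under the run-boundary hypotheses its two call sites establish
lemma pvRuns_eq (n : Nat) : ∀ (l : List String), l.length ≤ n → ∀ (pl : String) (first : Bool),
    (first = true → ∀ u rs, l = u :: rs → pl = pvLab u) →
    (first = false → ∀ u rs, l = u :: rs → pvLab u ≠ pl) →
    pvRuns l first = (l.all pvValid && pvChain pl l) := by
  induction n with
  | zero =>
    intro l hl pl first _ _
    have hnil : l = [] := by cases l <;> simp_all
    subst hnil; simp [pvRuns, pvChain]
  | succ n ih =>
    intro l hl pl first h1 h2
    cases l with
    | nil => simp [pvRuns, pvChain]
    | cons t rest =>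
      have hc : (if (pvPos t = "I-" ∨ pvPos t = "E-") ∧ pvLab t ≠ pl
          then false else pvChain (pvLab t) rest) = pvChain pl (t :: rest) := by
        simp [pvChain]
      by_cases hIE : pvPos t = "I-" ∨ pvPos t = "E-"
      · cases first with
        | true =>
          have hpl : pl = pvLab t := h1 rfl t rest rfl
          rw [show ((t :: rest).all pvValid && pvChain pl (t :: rest))
              = ((t :: rest).all pvValid && pvChain (pvLab t) rest) from by
            rw [← hc, if_neg (by simp [hpl])]]
          exact pv_runs_core n ih t rest hl true (by simp)
        | false =>
          have hne : pvLab t ≠ pl := h2 rfl t rest rfl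
          rw [pvRuns, if_pos ⟨rfl, hIE⟩]
          rw [← hc, if_pos ⟨hIE, hne⟩]
          simp
      · rw [show ((t :: rest).all pvValid && pvChain pl (t :: rest))
            = ((t :: rest).all pvValid && pvChain (pvLab t) rest) from by
          rw [← hc, if_neg (by simp [hIE])]]
        exact pv_runs_core n ih t rest hl first (by simp [hIE])

-- Python's set(tag_list) == {"O"} is "every tag is O" for a nonempty list
lemma pv_set_allO (t : String) (rest : List String) :
    PySem.Set.equal (PySem.Set.ofList (t :: rest)) (PySem.Set.ofList ["O"])
      = (t :: rest).all (fun s => decide (s = "O")) := by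
  by_cases hall : (t :: rest).all (fun s => decide (s = "O")) = true
  · rw [hall]
    rw [PySem.Set.equal_iff]
    intro x
    simp only [PySem.Set.mem_ofList, List.mem_singleton]
    constructor
    · intro hx
      have := List.all_eq_true.mp hall x hx
      simpa using this
    · intro hx
      subst hx
      have := List.all_eq_true.mp hall t (by simp)
      simp at this
      simp [this]
  · rw [Bool.eq_false_iff.mpr hall]
    rw [Bool.eq_false_iff]
    intro hEq
    apply hall
    rw [PySem.Set.equal_iff] at hEq
    rw [List.all_eq_true]
    intro x hx
    have := (hEq x).mp (by simpa [PySem.Set.mem_ofList] using hx)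
    simpa [PySem.Set.mem_ofList] using this

-- ===== VERDICT (by name: the statement is the Claim_ definition above) =====
theorem is_clean_tag_spec : Claim_equal_is_clean_tag := by
  intro tag_list _
  unfold Spec_is_clean_tag
  cases tag_list with
  | nil => simp [is_clean_tag, is_clean_tag_go, is_clean_tag_alt]
  | cons t rest =>
    -- A's normal form
    have hA : is_clean_tag (t :: rest)
        = ((t :: rest).all pvValid && pvChain (pvLab t) rest
            && pvEnd (pvLastPos (pvPos t) rest)
            && !((t :: rest).all (fun s => decide (s = "O")))) := by
      show is_clean_tag_go none none false (t :: rest) = _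
      simp only [is_clean_tag_go]
      by_cases hv : pvPos t = "B-" ∨ pvPos t = "I-" ∨ pvPos t = "E-" ∨ pvPos t = "S-" ∨ pvPos t = "O"
      · simp only [hv, not_true, ite_false]
        rw [pv_go_spec]
        have hval : pvValid t = true := by simp [pvValid, hv]
        have hfound : ((if t ≠ "O" then true else false) || rest.any (fun s => decide (s ≠ "O")))
            = !((t :: rest).all (fun s => decide (s = "O"))) := by
          by_cases ho : t = "O" <;> simp [ho, pv_any_ne_O]
        simp only [List.all_cons, hval, Bool.true_and]
        rw [hfound, List.all_cons]
      · have hval : pvValid t = false := by simp [pvValid, hv]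
        simp [hv, hval]
    -- B's normal form
    have hB : is_clean_tag_alt (t :: rest)
        = (if (t :: rest).all (fun s => decide (s = "O")) then false
           else if !pvEnd (pvLastPos (pvPos t) rest) then false
           else ((t :: rest).all pvValid && pvChain (pvLab t) rest)) := by
      show (if PySem.Set.equal _ _ then false else _) = _
      rw [pv_set_allO]
      have hlast : pvPos ((t :: rest).getLast (List.cons_ne_nil t rest))
          = pvLastPos (pvPos t) rest := by
        rw [pv_getLast_eq]; exact (pv_lastPos_getLastD rest t).symm
      by_cases hallO : (t :: rest).all (fun s => decide (s = "O")) = true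
      · simp [hallO]
      · rw [if_neg hallO, if_neg hallO]
        by_cases hend : pvLastPos (pvPos t) rest = "E-" ∨ pvLastPos (pvPos t) rest = "S-" ∨
            pvLastPos (pvPos t) rest = "O"
        · have hE : pvEnd (pvLastPos (pvPos t) rest) = true := by simp [pvEnd, hend]
          rw [if_neg (by rw [hlast]; exact not_not_intro hend), hE]
          rw [if_neg (by simp)]
          rw [pvRuns_eq ((t :: rest).length) (t :: rest) (le_refl _) (pvLab t) true
            (fun _ u rs he => by cases he; rfl) (by simp)]
          rw [show pvChain (pvLab t) (t :: rest) = pvChain (pvLab t) rest from by simp [pvChain]]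
        · have hE : pvEnd (pvLastPos (pvPos t) rest) = false := by simp [pvEnd, hend]
          rw [if_pos (by rw [hlast]; exact hend), hE]
          simp
    rw [hA, hB]
    by_cases hallO : (t :: rest).all (fun s => decide (s = "O")) = true
    · simp [hallO]
    · rw [if_neg hallO, Bool.eq_false_iff.mpr hallO]
      cases hE : pvEnd (pvLastPos (pvPos t) rest) with
      | false => simp
      | true => simp
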